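-- pv_equiv track=rewrite | github.com/Rudra2018/ai-job-autopilot | src/ml/ai_profile_generator.py | extract_skill_highlights
-- ===== SOURCE A (Python) =====
-- from typing import Dict, List, Optional, Any
--
-- def extract_skill_highlights(parsed_resume: Dict[str, Any]) -> List[str]:
--     """Extract top 6 skill highlights"""
--     skills = parsed_resume.get('skills', {})
--     highlights = []
--
--     # Priority order for skill categories
--     priority_categories = ['cybersecurity', 'programming_languages', 'frameworks', 'tools', 'soft_skills']
--
--     for category in priority_categories:
--         category_skills = skills.get(category, [])
--         for skill in category_skills:
--             if len(highlights) < 6: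
--                 highlights.append(skill)
--
--     # Fill remaining slots with any other skills
--     for category, skill_list in skills.items():
--         if category not in priority_categories:
--             for skill in skill_list:
--                 if len(highlights) < 6:
--                     highlights.append(skill)
--
--     return highlights
-- ===== SOURCE B (Python) =====
-- def extract_skill_highlights(parsed_resume):
--     """Thread a remaining-slot budget through a recursion over category groups,
--     stopping as soon as the budget is exhausted (no scan past the 6th skill)."""
--     skills = parsed_resume.get('skills', {})
--     priority = ['cybersecurity', 'programming_languages', 'frameworks', 'tools', 'soft_skills']
--
--     def take_budget(groups, k):
--         if k == 0 or not groups: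
--             return []
--         head = groups[0][:k]
--         return head + take_budget(groups[1:], k - len(head))
--
--     groups = [skills.get(c, []) for c in priority] + \
--              [lst for c, lst in skills.items() if c not in priority]
--     return take_budget(groups, 6)
-- ===== Notes on version B (the rewrite author's own statement) =====
-- stated objective: alternative
-- what changed: A scans every skill of every category and guards each append with len(highlights) < 6; B threads a remaining-slot budget through a recursion over the category groups, slicing each group to the budget and terminating as soon as the budget hits 0, never visiting skills past the 6th.
import Mathlib
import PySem

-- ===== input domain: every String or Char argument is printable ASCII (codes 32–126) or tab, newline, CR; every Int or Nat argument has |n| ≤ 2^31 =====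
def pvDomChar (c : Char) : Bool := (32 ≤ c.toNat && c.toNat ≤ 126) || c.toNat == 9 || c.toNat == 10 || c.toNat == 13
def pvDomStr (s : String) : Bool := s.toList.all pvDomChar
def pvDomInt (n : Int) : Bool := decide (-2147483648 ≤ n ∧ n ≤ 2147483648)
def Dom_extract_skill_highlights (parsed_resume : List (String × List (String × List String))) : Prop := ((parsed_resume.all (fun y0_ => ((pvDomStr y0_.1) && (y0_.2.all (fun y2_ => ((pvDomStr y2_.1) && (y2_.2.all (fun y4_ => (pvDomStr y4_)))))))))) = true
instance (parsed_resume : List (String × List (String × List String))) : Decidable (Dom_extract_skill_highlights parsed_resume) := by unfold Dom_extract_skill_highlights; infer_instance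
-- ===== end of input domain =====

-- B threads a remaining-slot budget through a recursion over the category groups and stops
-- when the budget is exhausted, instead of A's per-element len<6 append guard over two loop
-- phases (objective: alternative).


-- ===== PORT A =====
-- dict.get(k, dflt) on an association list: first match (hand-written, exact for dict-encoded inputs)
def pvLookupD {α : Type} (d : List (String × α)) (k : String) (dflt : α) : α :=
  match d with
  | [] => dflt
  | (k', v) :: rest => if k' == k then v else pvLookupD rest k dflt

def pvPriorityCategories : List String :=
  ["cybersecurity", "programming_languages", "frameworks", "tools", "soft_skills"]

-- 'if len(highlights) < 6: highlights.append(skill)'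
def pvStep (h : List String) (s : String) : List String :=
  if h.length < 6 then h ++ [s] else h

def extract_skill_highlights (parsed_resume : List (String × List (String × List String))) : List String :=
  let skills := pvLookupD parsed_resume "skills" []
  let highlights :=
    pvPriorityCategories.foldl (fun h category => (pvLookupD skills category []).foldl pvStep h) []
  skills.foldl
    (fun h kv => if !(pvPriorityCategories.contains kv.1) then kv.2.foldl pvStep h else h)
    highlights

-- ===== PORT B =====
-- Source B's take_budget: slice the first group to the remaining budget, recurse on the rest
-- with the budget reduced, stop at budget 0 or no groups left.
def pvTakeBudget (groups : List (List String)) (k : Nat) : List String :=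
  match groups with
  | [] => []
  | g :: rest =>
    if k = 0 then []
    else
      let head := g.take k
      head ++ pvTakeBudget rest (k - head.length)

def extract_skill_highlights_alt (parsed_resume : List (String × List (String × List String))) : List String :=
  let skills := pvLookupD parsed_resume "skills" []
  let groups :=
    (pvPriorityCategories.map (fun c => pvLookupD skills c []))
      ++ (skills.filter (fun kv => !(pvPriorityCategories.contains kv.1))).map Prod.snd
  pvTakeBudget groups 6

-- ===== PRECONDITION & SPEC =====
def Spec_extract_skill_highlights (parsed_resume : List (String × List (String × List String))) (out : List String) : Prop := out = extract_skill_highlights_alt parsed_resume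
instance (parsed_resume : List (String × List (String × List String))) (out : List String) : Decidable (Spec_extract_skill_highlights parsed_resume out) := by unfold Spec_extract_skill_highlights; infer_instance

-- ===== CLAIM (what is proved, stated in full; the proofs are below) =====
def Claim_equal_extract_skill_highlights : Prop := ∀ (parsed_resume : List (String × List (String × List String))), Dom_extract_skill_highlights parsed_resume → Spec_extract_skill_highlights parsed_resume (extract_skill_highlights parsed_resume)

-- ===== LEMMAS AND PROOFS =====

-- (take n l ++ m).take n glues to (l ++ m).take n
theorem pv_take_glue {α : Type} (l m : List α) (n : Nat) :
    ((l.take n) ++ m).take n = (l ++ m).take n := by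
  simp [List.take_append, List.length_take, List.take_take]
  congr 1
  omega

-- B's budget recursion computes a flatten-then-take
theorem pv_takeBudget_eq (groups : List (List String)) (k : Nat) :
    pvTakeBudget groups k = groups.flatten.take k := by
  induction groups generalizing k with
  | nil => simp [pvTakeBudget]
  | cons g rest ih =>
    simp only [pvTakeBudget, List.flatten_cons]
    by_cases hk : k = 0
    · simp [hk]
    · rw [if_neg hk, ih, List.take_append, List.length_take]
      congr 2
      omega

-- one inner loop of A: capped append over a list
theorem pv_foldl_step (xs : List String) (acc : List String) (h : acc.length ≤ 6) :
    xs.foldl pvStep acc = (acc ++ xs).take 6 := by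
  induction xs generalizing acc with
  | nil => simp [List.take_of_length_le h]
  | cons x xs ih =>
    simp only [List.foldl_cons, pvStep]
    by_cases hl : acc.length < 6
    · rw [if_pos hl, ih _ (by simp; omega)]
      simp
    · rw [if_neg hl]
      have h6 : acc.length = 6 := by omega
      rw [ih _ h]
      rw [List.take_append, List.take_append, h6]
      simp [List.take_of_length_le h6.le]

-- A's first phase over the priority categories
theorem pv_foldl_phase1 {σ : Type} (f : σ → List String) (ls : List σ) (acc : List String)
    (h : acc.length ≤ 6) :
    ls.foldl (fun h c => (f c).foldl pvStep h) acc = (acc ++ ls.flatMap f).take 6 := by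
  induction ls generalizing acc with
  | nil => simp [List.take_of_length_le h]
  | cons c ls ih =>
    simp only [List.foldl_cons]
    rw [pv_foldl_step _ _ h, ih _ (by simp [List.length_take]), pv_take_glue]
    simp

-- A's second phase over skills.items() with the 'not in priority' guard
theorem pv_foldl_phase2 {κ : Type} (p : κ × List String → Bool)
    (items : List (κ × List String)) (acc : List String) (h : acc.length ≤ 6) :
    items.foldl (fun h kv => if p kv then kv.2.foldl pvStep h else h) acc
      = (acc ++ (items.filter p).flatMap Prod.snd).take 6 := by
  induction items generalizing acc with
  | nil => simp [List.take_of_length_le h]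
  | cons kv items ih =>
    simp only [List.foldl_cons]
    by_cases hp : p kv
    · rw [if_pos hp, pv_foldl_step _ _ h, ih _ (by simp [List.length_take]),
        pv_take_glue]
      simp [hp]
    · rw [if_neg hp, ih _ h]
      simp [hp]

-- ===== VERDICT (by name: the statement is the Claim_ definition above) =====
theorem extract_skill_highlights_spec : Claim_equal_extract_skill_highlights := by
  intro parsed_resume _
  unfold Spec_extract_skill_highlights extract_skill_highlights extract_skill_highlights_alt
  simp only []
  rw [pv_foldl_phase1 _ _ _ (by simp),
    pv_foldl_phase2 _ _ _ (by simp [List.length_take]),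
    pv_take_glue, pv_takeBudget_eq]
  simp [List.flatMap_def]
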